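-- pv_equiv track=rewrite | github.com/beng0/myworkspace35 | py_grab_test/util/my_excel_to_db.py | ping_string
-- ===== SOURCE A (Python) =====
-- def ping_string(field_sql,s1,s2,s3):
--     field_sql_count=len(field_sql)
--     count = 0
--     field_sql_temp = []
--     for  field in field_sql:
--         if  count == field_sql_count-1:
--             temp = s1+field +s3
--             field_sql_temp.append(temp)
--             break
--         temp= s1+field +s2
--         field_sql_temp.append(temp)
--         count +=1
--
--     s = ' '.join(field_sql_temp)
--     return s
-- ===== SOURCE B (Python) =====
-- def ping_string(field_sql, s1, s2, s3):
--     if not field_sql: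
--         return ''
--     return s1 + (s2 + ' ' + s1).join(field_sql) + s3
-- ===== Notes on version B (the rewrite author's own statement) =====
-- stated objective: idiomatic
-- what changed: Replaces the counter-driven loop that wraps each field and special-cases the last one with a single closed-form str.join using the separator s2+' '+s1, plus the outer s1/s3.
import Mathlib
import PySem

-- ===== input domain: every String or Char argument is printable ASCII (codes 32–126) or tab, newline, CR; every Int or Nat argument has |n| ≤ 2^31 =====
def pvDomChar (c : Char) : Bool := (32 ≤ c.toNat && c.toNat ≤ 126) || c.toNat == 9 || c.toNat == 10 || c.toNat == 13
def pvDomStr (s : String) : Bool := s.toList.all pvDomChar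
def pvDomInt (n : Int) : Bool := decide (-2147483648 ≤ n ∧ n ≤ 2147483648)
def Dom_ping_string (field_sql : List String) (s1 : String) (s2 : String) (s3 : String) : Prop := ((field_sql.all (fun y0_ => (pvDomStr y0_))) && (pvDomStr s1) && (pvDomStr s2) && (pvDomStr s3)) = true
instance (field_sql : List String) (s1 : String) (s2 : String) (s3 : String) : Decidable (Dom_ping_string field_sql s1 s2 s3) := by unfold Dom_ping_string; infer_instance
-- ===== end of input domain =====

-- ===== PORT A =====
-- loop of A: walks the list with the running count and the accumulator field_sql_temp;
-- breaks (stops) after appending s1+field+s3 when count == len-1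
def pingLoop (s1 s2 s3 : String) (n : Nat) : List String → Nat → List String → List String
  | [], _, acc => acc
  | f :: rest, count, acc =>
      if count == n - 1 then acc ++ [s1 ++ f ++ s3]
      else pingLoop s1 s2 s3 n rest (count + 1) (acc ++ [s1 ++ f ++ s2])

def ping_string (field_sql : List String) (s1 : String) (s2 : String) (s3 : String) : String :=
  let field_sql_count := field_sql.length
  let field_sql_temp := pingLoop s1 s2 s3 field_sql_count field_sql 0 []
  PySem.Str.join " " field_sql_temp

-- ===== PORT B =====
def ping_string_alt (field_sql : List String) (s1 : String) (s2 : String) (s3 : String) : String :=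
  match field_sql with
  | [] => ""
  | _ => s1 ++ PySem.Str.join (s2 ++ " " ++ s1) field_sql ++ s3

-- ===== PRECONDITION & SPEC =====
def Spec_ping_string (field_sql : List String) (s1 : String) (s2 : String) (s3 : String) (out : String) : Prop := out = ping_string_alt field_sql s1 s2 s3
instance (field_sql : List String) (s1 : String) (s2 : String) (s3 : String) (out : String) : Decidable (Spec_ping_string field_sql s1 s2 s3 out) := by unfold Spec_ping_string; infer_instance

-- ===== CLAIM (what is proved, stated in full; the proofs are below) =====
def Claim_equal_ping_string : Prop := ∀ (field_sql : List String) (s1 : String) (s2 : String) (s3 : String), Dom_ping_string field_sql s1 s2 s3 → Spec_ping_string field_sql s1 s2 s3 (ping_string field_sql s1 s2 s3)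

-- ===== LEMMAS AND PROOFS =====

-- A's wrapped list, written structurally: every field gets s1 … s2 except the last, which gets s1 … s3
def wrapA (s1 s2 s3 : String) : List String → List String
  | [] => []
  | [f] => [s1 ++ f ++ s3]
  | f :: g :: rest => (s1 ++ f ++ s2) :: wrapA s1 s2 s3 (g :: rest)

theorem pingLoop_spec (s1 s2 s3 : String) :
    ∀ (l : List String) (count : Nat) (acc : List String),
      pingLoop s1 s2 s3 (count + l.length) l count acc = acc ++ wrapA s1 s2 s3 l := by
  intro l
  induction l with
  | nil => intro count acc; simp [pingLoop, wrapA]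
  | cons f rest ih =>
    intro count acc
    cases rest with
    | nil => simp [pingLoop, wrapA]
    | cons g rest' =>
      conv_lhs => rw [pingLoop]
      rw [if_neg (by simp)]
      rw [show count + (f :: g :: rest').length = count + 1 + (g :: rest').length by
        simp; omega]
      rw [ih (count + 1) (acc ++ [s1 ++ f ++ s2])]
      simp [wrapA]

theorem wrapA_cons_ne_nil (s1 s2 s3 g : String) (rest' : List String) :
    ∃ w ws, wrapA s1 s2 s3 (g :: rest') = w :: ws := by
  cases rest' <;> simp [wrapA]

theorem join_wrapA (s1 s2 s3 : String) :
    ∀ (rest : List String) (f : String),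
      PySem.Chars.join " ".toList (List.map String.toList (wrapA s1 s2 s3 (f :: rest))) =
        s1.toList ++ PySem.Chars.join (s2.toList ++ " ".toList ++ s1.toList)
          (List.map String.toList (f :: rest)) ++ s3.toList := by
  intro rest
  induction rest with
  | nil =>
    intro f
    simp [wrapA, PySem.Chars.join_singleton]
  | cons g rest' ih =>
    intro f
    obtain ⟨w, ws, hw⟩ := wrapA_cons_ne_nil s1 s2 s3 g rest'
    have hjoin := ih g
    simp only [hw, List.map_cons] at hjoin
    simp only [wrapA, hw, List.map_cons]
    rw [PySem.Chars.join_cons_cons, PySem.Chars.join_cons_cons, hjoin]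
    simp [String.toList_append]

theorem ping_string_eq_join (field_sql : List String) (s1 s2 s3 : String) :
    ping_string field_sql s1 s2 s3 =
      PySem.Str.join " " (pingLoop s1 s2 s3 field_sql.length field_sql 0 []) := rfl

-- ===== VERDICT (by name: the statement is the Claim_ definition above) =====
theorem ping_string_spec : Claim_equal_ping_string := by
  intro field_sql s1 s2 s3 _
  unfold Spec_ping_string
  rw [ping_string_eq_join]
  cases field_sql with
  | nil =>
    apply String.toList_injective
    simp [pingLoop, ping_string_alt, PySem.Str.toList_join, PySem.Chars.join_nil]
  | cons f rest =>
    have h := pingLoop_spec s1 s2 s3 (f :: rest) 0 []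
    simp only [Nat.zero_add] at h
    rw [h, List.nil_append]
    apply String.toList_injective
    simp only [ping_string_alt, PySem.Str.toList_join, String.toList_append]
    exact join_wrapA s1 s2 s3 rest f
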